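-- pv_equiv track=rewrite | github.com/oikonai/code-ingest | modules/ingest/parsers/solidity_parser.py | _classify_solidity_item_type
-- ===== SOURCE A (Python) =====
-- def _classify_solidity_item_type(content: str, base_type: str) -> str:
--     """Classify the Solidity item type more specifically."""
--     content_lower = content.lower()
--
--     # Detect specific contract patterns
--     if base_type == 'contract':
--         if 'abstract contract' in content_lower:
--             return 'abstract_contract'
--         elif any(pattern in content_lower for pattern in ['erc20', 'erc721', 'erc1155']):
--             return 'token_contract'
--         elif 'ownable' in content_lower or 'accesscontrol' in content_lower:
--             return 'access_contract'
--         elif 'proxy' in content_lower or 'upgradeable' in content_lower: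
--             return 'proxy_contract'
--
--     # Detect function visibility and type
--     elif base_type == 'function':
--         if 'constructor' in content_lower:
--             return 'constructor'
--         elif 'external' in content_lower:
--             return 'external_function'
--         elif 'public' in content_lower:
--             return 'public_function'
--         elif 'internal' in content_lower:
--             return 'internal_function'
--         elif 'private' in content_lower:
--             return 'private_function'
--
--     return base_type
-- ===== SOURCE B (Python) =====
-- # Flat keyword table: every (base_type, keyword, label) triple with its priority = position.
-- _KEYWORDS = [
--     ('contract', 'abstract contract', 'abstract_contract'),
--     ('contract', 'erc20', 'token_contract'),
--     ('contract', 'erc721', 'token_contract'),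
--     ('contract', 'erc1155', 'token_contract'),
--     ('contract', 'ownable', 'access_contract'),
--     ('contract', 'accesscontrol', 'access_contract'),
--     ('contract', 'proxy', 'proxy_contract'),
--     ('contract', 'upgradeable', 'proxy_contract'),
--     ('function', 'constructor', 'constructor'),
--     ('function', 'external', 'external_function'),
--     ('function', 'public', 'public_function'),
--     ('function', 'internal', 'internal_function'),
--     ('function', 'private', 'private_function'),
-- ]
--
--
-- def _classify_solidity_item_type(content: str, base_type: str) -> str:
--     """Exhaustively collect every matching keyword, then select the
--     highest-priority (lowest-index) match; no short-circuit cascade."""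
--     content_lower = content.lower()
--     matches = [(i, label) for i, (bt, kw, label) in enumerate(_KEYWORDS)
--                if bt == base_type and kw in content_lower]
--     if not matches:
--         return base_type
--     return min(matches, key=lambda m: m[0])[1]
-- ===== Notes on version B (the rewrite author's own statement) =====
-- stated objective: alternative
-- what changed: Instead of A's short-circuiting if/elif cascade over grouped checks, B evaluates every (base_type, keyword, label) triple of a flat table exhaustively, collects all matches with their priority index, and selects the minimum-priority match.
import Mathlib
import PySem

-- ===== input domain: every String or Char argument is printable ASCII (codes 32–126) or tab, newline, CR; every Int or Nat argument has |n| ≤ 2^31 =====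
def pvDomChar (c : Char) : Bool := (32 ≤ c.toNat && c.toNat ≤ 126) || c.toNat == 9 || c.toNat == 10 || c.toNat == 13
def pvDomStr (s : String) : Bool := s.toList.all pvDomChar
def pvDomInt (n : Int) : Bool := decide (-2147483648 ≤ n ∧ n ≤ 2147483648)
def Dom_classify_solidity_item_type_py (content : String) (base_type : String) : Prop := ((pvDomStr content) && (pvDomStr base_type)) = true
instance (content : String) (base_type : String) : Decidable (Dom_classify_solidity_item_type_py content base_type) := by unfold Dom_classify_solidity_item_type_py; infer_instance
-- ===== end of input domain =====

-- B replaces A's short-circuiting if/elif cascade by an exhaustive scan of a flat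
-- (base_type, keyword, label) table followed by a minimum-priority selection (objective: alternative).

-- ===== PORT A =====
def classify_solidity_item_type_py (content : String) (base_type : String) : String :=
  let content_lower := PySem.Str.lower content
  if base_type = "contract" then
    if PySem.Str.isIn "abstract contract" content_lower then "abstract_contract"
    else if (["erc20", "erc721", "erc1155"] : List String).any
        (fun pattern => PySem.Str.isIn pattern content_lower) then "token_contract"
    else if PySem.Str.isIn "ownable" content_lower || PySem.Str.isIn "accesscontrol" content_lower then
      "access_contract"
    else if PySem.Str.isIn "proxy" content_lower || PySem.Str.isIn "upgradeable" content_lower then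
      "proxy_contract"
    else base_type
  else if base_type = "function" then
    if PySem.Str.isIn "constructor" content_lower then "constructor"
    else if PySem.Str.isIn "external" content_lower then "external_function"
    else if PySem.Str.isIn "public" content_lower then "public_function"
    else if PySem.Str.isIn "internal" content_lower then "internal_function"
    else if PySem.Str.isIn "private" content_lower then "private_function"
    else base_type
  else base_type

-- ===== PORT B =====
def pvKEYWORDS : List (String × String × String) :=
  [ ("contract", "abstract contract", "abstract_contract")
  , ("contract", "erc20", "token_contract")
  , ("contract", "erc721", "token_contract")
  , ("contract", "erc1155", "token_contract")
  , ("contract", "ownable", "access_contract")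
  , ("contract", "accesscontrol", "access_contract")
  , ("contract", "proxy", "proxy_contract")
  , ("contract", "upgradeable", "proxy_contract")
  , ("function", "constructor", "constructor")
  , ("function", "external", "external_function")
  , ("function", "public", "public_function")
  , ("function", "internal", "internal_function")
  , ("function", "private", "private_function") ]

def classify_solidity_item_type_py_alt (content : String) (base_type : String) : String :=
  let content_lower := PySem.Str.lower content
  -- the list comprehension of Source B: enumerate + filter + map
  let ms : List (Int × String) :=
    (PySem.List.enumerate pvKEYWORDS 0).filterMap
      (fun p =>
        if p.2.1 = base_type ∧ PySem.Str.isIn p.2.2.1 content_lower then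
          some (p.1, p.2.2.2)
        else none)
  match PySem.List.min? ms (fun m => m.1) with
  | none => base_type
  | some m => m.2

-- ===== PRECONDITION & SPEC =====
def Spec_classify_solidity_item_type_py (content : String) (base_type : String) (out : String) : Prop := out = classify_solidity_item_type_py_alt content base_type
instance (content : String) (base_type : String) (out : String) : Decidable (Spec_classify_solidity_item_type_py content base_type out) := by unfold Spec_classify_solidity_item_type_py; infer_instance

-- ===== CLAIM =====
def Claim_equal_classify_solidity_item_type_py : Prop := ∀ (content : String) (base_type : String), Dom_classify_solidity_item_type_py content base_type → Spec_classify_solidity_item_type_py content base_type (classify_solidity_item_type_py content base_type)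

-- ===== LEMMAS AND PROOFS =====

-- ===== VERDICT =====
set_option maxHeartbeats 2000000 in
theorem classify_solidity_item_type_py_spec : Claim_equal_classify_solidity_item_type_py := by
  intro content base_type _
  unfold Spec_classify_solidity_item_type_py classify_solidity_item_type_py
    classify_solidity_item_type_py_alt pvKEYWORDS
  by_cases hc : base_type = "contract"
  · subst hc
    by_cases h1 : PySem.Str.isIn "abstract contract" (PySem.Str.lower content) <;>
    by_cases h2 : PySem.Str.isIn "erc20" (PySem.Str.lower content) <;>
    by_cases h3 : PySem.Str.isIn "erc721" (PySem.Str.lower content) <;>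
    by_cases h4 : PySem.Str.isIn "erc1155" (PySem.Str.lower content) <;>
    by_cases h5 : PySem.Str.isIn "ownable" (PySem.Str.lower content) <;>
    by_cases h6 : PySem.Str.isIn "accesscontrol" (PySem.Str.lower content) <;>
    by_cases h7 : PySem.Str.isIn "proxy" (PySem.Str.lower content) <;>
    by_cases h8 : PySem.Str.isIn "upgradeable" (PySem.Str.lower content) <;>
      simp at h1 h2 h3 h4 h5 h6 h7 h8 <;>
      simp [PySem.List.enumerate_cons, PySem.List.enumerate_nil, PySem.List.min?, List.filterMap,
        h1, h2, h3, h4, h5, h6, h7, h8]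
  · by_cases hf : base_type = "function"
    · subst hf
      by_cases h1 : PySem.Str.isIn "constructor" (PySem.Str.lower content) <;>
      by_cases h2 : PySem.Str.isIn "external" (PySem.Str.lower content) <;>
      by_cases h3 : PySem.Str.isIn "public" (PySem.Str.lower content) <;>
      by_cases h4 : PySem.Str.isIn "internal" (PySem.Str.lower content) <;>
      by_cases h5 : PySem.Str.isIn "private" (PySem.Str.lower content) <;>
        simp at h1 h2 h3 h4 h5 <;>
        simp [PySem.List.enumerate_cons, PySem.List.enumerate_nil, PySem.List.min?, List.filterMap,
          h1, h2, h3, h4, h5]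
    · simp [PySem.List.enumerate_cons, PySem.List.enumerate_nil, PySem.List.min?, List.filterMap,
        hc, hf, show ("contract" = base_type) = False by simp; exact fun h => hc h.symm,
        show ("function" = base_type) = False by simp; exact fun h => hf h.symm]
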